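-- pv_equiv track=rewrite | github.com/sophiakolak/suffix-repair | build_db/bug_parser.py | find_add_line_numbers
-- ===== SOURCE A (Python) =====
-- def clean_diffs(lines_changed):
--     bugs = {}
--     for idx, line in lines_changed.items():
--         bug = line[1:].replace("\n", "")
--         bugs[idx] = bug
--     return bugs
--
-- def find_add_line_numbers(diff_block, bug_start_line, lines_added):
--     diff_block = diff_block.split("\n")
--     patches = clean_diffs(lines_added)
--     adjusted_idx = {}
--     start_line, lines_seen = bug_start_line, 0
--     for idx, patch in patches.items():
--         offset = 0
--         for line in diff_block:
--             if offset < lines_seen: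
--                 offset += 1
--                 continue
--             if line == patch:
--                 adjusted_idx[start_line+offset] = line + "\n"
--                 lines_seen += 1
--                 break
--             lines_seen += 1
--             offset += 1
--     return adjusted_idx
-- ===== SOURCE B (Python) =====
-- def find_add_line_numbers(diff_block, bug_start_line, lines_added):
--     # One advancing index into the split diff block; each patch resumes where
--     # the previous one stopped.
--     lines = diff_block.split("\n")
--     n = len(lines)
--     patches = {}
--     for idx, line in lines_added.items():
--         patches[idx] = line[1:].replace("\n", "")
--     result = {}
--     j = 0
--     for patch in patches.values():
--         while j < n and lines[j] != patch:
--             j += 1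
--         if j < n:
--             result[bug_start_line + j] = lines[j] + "\n"
--             j += 1
--     return result
-- ===== Notes on version B (the rewrite author's own statement) =====
-- stated objective: alternative
-- what changed: B keeps one advancing index into the split diff block and resumes each patch's search where the previous one stopped, instead of A's restart-and-skip inner loop that re-walks the already-consumed prefix for every patch.
import Mathlib
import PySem

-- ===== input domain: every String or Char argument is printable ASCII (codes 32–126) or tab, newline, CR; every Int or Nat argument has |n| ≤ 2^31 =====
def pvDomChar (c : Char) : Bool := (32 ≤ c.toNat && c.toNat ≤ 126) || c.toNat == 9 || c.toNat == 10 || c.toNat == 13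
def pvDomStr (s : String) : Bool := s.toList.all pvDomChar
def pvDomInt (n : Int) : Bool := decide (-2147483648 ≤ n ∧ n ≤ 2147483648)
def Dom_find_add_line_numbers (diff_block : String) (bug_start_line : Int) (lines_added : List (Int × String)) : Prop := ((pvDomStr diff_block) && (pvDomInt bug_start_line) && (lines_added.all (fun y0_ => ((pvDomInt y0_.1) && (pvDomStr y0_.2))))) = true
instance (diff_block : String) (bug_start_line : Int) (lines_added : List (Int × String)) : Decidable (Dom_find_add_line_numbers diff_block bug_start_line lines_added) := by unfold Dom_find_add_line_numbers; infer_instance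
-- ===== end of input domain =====

-- B replaces A's per-patch restart-and-skip inner scan by a single advancing index into
-- the split diff block; return values are identical everywhere.

-- ===== PORT A =====
-- helper clean_diffs: bugs[idx] = line[1:].replace("\n", "")
def clean_diffs (lines_changed : List (Int × String)) : PySem.Dict Int String :=
  lines_changed.foldl
    (fun bugs p =>
      bugs.insert p.1 (PySem.Str.replace (PySem.Str.slice p.2 (some 1) none) "\n" ""))
    PySem.Dict.empty

-- the inner 'for line in diff_block' loop of A, with its continue/break, state = (adjusted_idx, lines_seen)
def pvInnerA (patch : String) (start : Int) :
    List String → Nat → Nat → PySem.Dict Int String → PySem.Dict Int String × Nat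
  | [], _, ls, adj => (adj, ls)
  | line :: rest, offset, ls, adj =>
    if offset < ls then pvInnerA patch start rest (offset + 1) ls adj
    else if line = patch then (adj.insert (start + (offset : Int)) (line ++ "\n"), ls + 1)
    else pvInnerA patch start rest (offset + 1) (ls + 1) adj

-- the outer 'for idx, patch in patches.items()' loop of A
def pvOuterA (lines : List String) (start : Int) :
    List (Int × String) → PySem.Dict Int String → Nat → PySem.Dict Int String
  | [], adj, _ => adj
  | (_, patch) :: ps, adj, ls =>
    let r := pvInnerA patch start lines 0 ls adj
    pvOuterA lines start ps r.1 r.2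

def find_add_line_numbers (diff_block : String) (bug_start_line : Int)
    (lines_added : List (Int × String)) : List (Int × String) :=
  let lines := (PySem.Str.split? diff_block "\n").getD []
  let patches := clean_diffs lines_added
  (pvOuterA lines bug_start_line patches.items PySem.Dict.empty 0).items

-- ===== PORT B =====
-- B's 'while j < n and lines[j] != patch: j += 1'
def pvAdvance (lines : List String) (patch : String) (j : Nat) : Nat :=
  if h : j < lines.length ∧ lines[j]! ≠ patch then pvAdvance lines patch (j + 1) else j
termination_by lines.length - j
decreasing_by have := h.1; omega

-- B's 'for patch in patches.values()' loop, state = (j, result)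
def pvOuterB (lines : List String) (start : Int) :
    List String → Nat → PySem.Dict Int String → PySem.Dict Int String
  | [], _, res => res
  | patch :: ps, j, res =>
    let j' := pvAdvance lines patch j
    if j' < lines.length then
      pvOuterB lines start ps (j' + 1) (res.insert (start + (j' : Int)) (lines[j']! ++ "\n"))
    else pvOuterB lines start ps j' res

def find_add_line_numbers_alt (diff_block : String) (bug_start_line : Int)
    (lines_added : List (Int × String)) : List (Int × String) :=
  let lines := (PySem.Str.split? diff_block "\n").getD []
  let patches := lines_added.foldl
    (fun d p =>
      d.insert p.1 (PySem.Str.replace (PySem.Str.slice p.2 (some 1) none) "\n" ""))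
    PySem.Dict.empty
  (pvOuterB lines bug_start_line patches.values 0 PySem.Dict.empty).items

-- ===== PRECONDITION & SPEC =====
def Spec_find_add_line_numbers (diff_block : String) (bug_start_line : Int) (lines_added : List (Int × String)) (out : List (Int × String)) : Prop := out = find_add_line_numbers_alt diff_block bug_start_line lines_added
instance (diff_block : String) (bug_start_line : Int) (lines_added : List (Int × String)) (out : List (Int × String)) : Decidable (Spec_find_add_line_numbers diff_block bug_start_line lines_added out) := by unfold Spec_find_add_line_numbers; infer_instance

-- ===== CLAIM (what is proved, stated in full; the proofs are below) =====
def Claim_equal_find_add_line_numbers : Prop := ∀ (diff_block : String) (bug_start_line : Int) (lines_added : List (Int × String)), Dom_find_add_line_numbers diff_block bug_start_line lines_added → Spec_find_add_line_numbers diff_block bug_start_line lines_added (find_add_line_numbers diff_block bug_start_line lines_added)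

-- ===== LEMMAS AND PROOFS =====

-- Skip phase: A's inner loop just walks past the first d = lines_seen - offset elements.
theorem pvInnerA_skip (patch : String) (start : Int) :
    ∀ (d : Nat) (lines : List String) (offset : Nat) (adj : PySem.Dict Int String),
      d ≤ lines.length →
      pvInnerA patch start lines offset (offset + d) adj
        = pvInnerA patch start (lines.drop d) (offset + d) (offset + d) adj := by
  intro d
  induction d with
  | zero => intro lines offset adj _; simp
  | succ d ih =>
    intro lines offset adj h
    cases lines with
    | nil => simp at h
    | cons l rest =>
      have : pvInnerA patch start (l :: rest) offset (offset + (d + 1)) adj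
          = pvInnerA patch start rest (offset + 1) (offset + (d + 1)) adj := by
        simp [pvInnerA]
      rw [this]
      have h' : d ≤ rest.length := by simpa using h
      have := ih rest (offset + 1) adj h'
      simpa [Nat.add_assoc, Nat.add_comm, Nat.add_left_comm] using this

-- Match phase: from position j (= lines_seen) A's inner loop is B's while-advance.
theorem pvInnerA_match (patch : String) (start : Int) (lines : List String) :
    ∀ (j : Nat) (adj : PySem.Dict Int String), j ≤ lines.length →
      pvInnerA patch start (lines.drop j) j j adj
        = (let j' := pvAdvance lines patch j
           if j' < lines.length then
             (adj.insert (start + (j' : Int)) (lines[j']! ++ "\n"), j' + 1)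
           else (adj, j')) := by
  intro j
  induction hd : lines.length - j using Nat.strong_induction_on generalizing j with
  | _ d ih =>
    intro adj hj
    rcases Nat.lt_or_ge j lines.length with hlt | hge
    · have hdrop : lines.drop j = lines[j] :: lines.drop (j + 1) :=
        List.drop_eq_getElem_cons hlt
      have hbang : lines[j]! = lines[j] := getElem!_pos lines j hlt
      by_cases heq : lines[j] = patch
      · rw [hdrop]
        have hadv : pvAdvance lines patch j = j := by
          rw [pvAdvance]; simp [heq, hlt]
        simp [pvInnerA, heq, hadv, hlt]
      · have hadv : pvAdvance lines patch j = pvAdvance lines patch (j + 1) := by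
          rw [pvAdvance]; simp [heq, hlt]
        have hstep : pvInnerA patch start (lines.drop j) j j adj
            = pvInnerA patch start (lines.drop (j + 1)) (j + 1) (j + 1) adj := by
          rw [hdrop]; simp [pvInnerA, heq]
        rw [hstep, hadv]
        exact ih (lines.length - (j + 1)) (by omega) (j + 1) rfl adj (by omega)
    · have hj' : j = lines.length := le_antisymm hj hge
      subst hj'
      have hadv : pvAdvance lines patch lines.length = lines.length := by
        rw [pvAdvance]; simp
      simp [List.drop_length, pvInnerA, hadv]

-- the while-advance never leaves the list
theorem pvAdvance_le (lines : List String) (patch : String) :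
    ∀ j, j ≤ lines.length → pvAdvance lines patch j ≤ lines.length := by
  intro j
  induction hd : lines.length - j using Nat.strong_induction_on generalizing j with
  | _ d ih =>
    intro hj
    rw [pvAdvance]
    split
    · next h => exact ih (lines.length - (j + 1)) (by omega) (j + 1) rfl (by omega)
    · exact hj

-- Main loop correspondence: A's (adjusted, lines_seen) state equals B's (result, j) state.
theorem pvOuter_eq (lines : List String) (start : Int) :
    ∀ (ps : List (Int × String)) (adj : PySem.Dict Int String) (j : Nat),
      j ≤ lines.length →
      pvOuterA lines start ps adj j = pvOuterB lines start (ps.map Prod.snd) j adj := by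
  intro ps
  induction ps with
  | nil => intro adj j _; simp [pvOuterA, pvOuterB]
  | cons p ps ih =>
    intro adj j hj
    obtain ⟨idx, patch⟩ := p
    have hskip := pvInnerA_skip patch start j lines 0 adj hj
    simp only [Nat.zero_add] at hskip
    have hmatch := pvInnerA_match patch start lines j adj hj
    have hinner : pvInnerA patch start lines 0 j adj
        = (let j' := pvAdvance lines patch j
           if j' < lines.length then
             (adj.insert (start + (j' : Int)) (lines[j']! ++ "\n"), j' + 1)
           else (adj, j')) := by rw [hskip, hmatch]
    set j' := pvAdvance lines patch j with hj'def
    by_cases hlt : j' < lines.length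
    · simp only [hlt, if_pos] at hinner
      show pvOuterA lines start ((idx, patch) :: ps) adj j = _
      simp only [pvOuterA, hinner, List.map_cons, pvOuterB, ← hj'def, hlt, if_pos]
      exact ih _ (j' + 1) (by omega)
    · simp only [hlt, if_neg, not_false_iff] at hinner
      show pvOuterA lines start ((idx, patch) :: ps) adj j = _
      simp only [pvOuterA, hinner, List.map_cons, pvOuterB, ← hj'def, hlt, if_neg,
        not_false_iff]
      exact ih _ j' (pvAdvance_le lines patch j hj)

-- ===== VERDICT (by name: the statement is the Claim_ definition above) =====
theorem find_add_line_numbers_spec : Claim_equal_find_add_line_numbers := by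
  intro diff_block bug_start_line lines_added _
  unfold Spec_find_add_line_numbers find_add_line_numbers find_add_line_numbers_alt clean_diffs
  simp only [PySem.Dict.values]
  exact congrArg PySem.Dict.items
    (pvOuter_eq ((PySem.Str.split? diff_block "\n").getD []) bug_start_line _ PySem.Dict.empty 0
      (Nat.zero_le _))
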